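-- pv_equiv track=rewrite | github.com/krolikladoshka/solveit | yandex/lektionfunf.py | prefzeroes1
-- ===== SOURCE A (Python) =====
-- def prefzeroes1(seq):
--     ps = [0] * (len(seq) + 1)
--
--     for i in range(0, len(seq)):
--         if seq[i] == 0:
--             ps[i + 1] = ps[i] + 1
--         else:
--             ps[i + 1] = ps[i]
--     return ps
-- ===== SOURCE B (Python) =====
-- def prefzeroes1(seq):
--     # Divide and conquer: the prefix-zero table of seq[lo:hi] is the left half's
--     # table followed by the right half's table (minus its leading 0) shifted by
--     # the left half's total zero count.
--     def table(lo, hi):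
--         if hi - lo == 0:
--             return [0]
--         if hi - lo == 1:
--             return [0, 1 if seq[lo] == 0 else 0]
--         mid = (lo + hi) // 2
--         left = table(lo, mid)
--         right = table(mid, hi)
--         last = left[-1]
--         return left + [last + c for c in right[1:]]
--     return table(0, len(seq))
-- ===== Notes on version B (the rewrite author's own statement) =====
-- stated objective: alternative
-- what changed: Replaces A's single indexed pass that writes into a preallocated array by a divide-and-conquer recursion: split the range in half, build each half's prefix-zero table recursively, and merge by offsetting the right table (minus its leading 0) with the left table's last entry.
import Mathlib
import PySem

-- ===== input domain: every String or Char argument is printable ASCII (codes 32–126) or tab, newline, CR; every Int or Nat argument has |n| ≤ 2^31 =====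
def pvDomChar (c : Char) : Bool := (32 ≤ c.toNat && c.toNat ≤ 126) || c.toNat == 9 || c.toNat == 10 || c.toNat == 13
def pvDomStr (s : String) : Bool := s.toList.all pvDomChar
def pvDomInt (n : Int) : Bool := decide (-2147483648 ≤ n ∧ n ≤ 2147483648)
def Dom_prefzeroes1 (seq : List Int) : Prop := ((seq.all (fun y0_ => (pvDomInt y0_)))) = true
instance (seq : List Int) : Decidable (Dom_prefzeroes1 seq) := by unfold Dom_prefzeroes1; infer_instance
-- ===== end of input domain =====

-- B replaces A's single indexed pass over a preallocated array by a divide-and-conquer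
-- recursion that merges half-tables by offsetting the right one (objective: alternative).


-- ===== PORT A =====
-- ps = [0] * (len(seq) + 1); for i in range(0, len(seq)): ps[i+1] = ps[i] (+1 if seq[i]==0)
-- All indices seq[i], ps[i], ps[i+1] are in range for i in range(0, len(seq)), so the
-- pyGetD/pySetD defaults are never taken (exact).
def prefzeroes1 (seq : List Int) : List Int :=
  let ps : List Int := List.replicate (seq.length + 1) 0
  (PySem.List.pyRange 0 (seq.length : Int) 1).foldl (fun ps i =>
    if PySem.List.pyGetD seq i 0 == 0 then
      PySem.List.pySetD ps (i + 1) (PySem.List.pyGetD ps i 0 + 1)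
    else
      PySem.List.pySetD ps (i + 1) (PySem.List.pyGetD ps i 0)) ps

-- ===== PORT B =====
-- def table(lo, hi): base cases for width 0 and 1, else split at mid=(lo+hi)//2 and
-- merge 'left + [last + c for c in right[1:]]' with last = left[-1].
-- lo, hi are Nat: the Python helper is only ever called with 0 ≤ lo ≤ hi, so Nat
-- indices and Nat (lo+hi)/2 are exact for (lo+hi)//2. left[-1] and right[1:] are
-- ported with the PySem primitives (left is always nonempty).
-- fuel = hi - lo bounds the recursion depth (a totality guard only; it is never
-- exhausted on the calls made, proved in tableB_eq below).
def pvTableB (seq : List Int) : Nat → Nat → Nat → List Int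
  | 0, _, _ => [0]
  | fuel + 1, lo, hi =>
    if hi - lo = 0 then [0]
    else if hi - lo = 1 then
      [0, if PySem.List.pyGetD seq (lo : Int) 0 == 0 then 1 else 0]
    else
      let mid := (lo + hi) / 2
      let left := pvTableB seq fuel lo mid
      let right := pvTableB seq fuel mid hi
      let last := PySem.List.pyGetD left (-1) 0
      left ++ (PySem.List.slice right (some (1 : Int)) none).map (fun c => last + c)

def prefzeroes1_alt (seq : List Int) : List Int :=
  pvTableB seq seq.length 0 seq.length

-- ===== PRECONDITION & SPEC =====
def Spec_prefzeroes1 (seq : List Int) (out : List Int) : Prop := out = prefzeroes1_alt seq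
instance (seq : List Int) (out : List Int) : Decidable (Spec_prefzeroes1 seq out) := by unfold Spec_prefzeroes1; infer_instance

-- ===== CLAIM (what is proved, stated in full; the proofs are below) =====
def Claim_equal_prefzeroes1 : Prop := ∀ (seq : List Int), Dom_prefzeroes1 seq → Spec_prefzeroes1 seq (prefzeroes1 seq)

-- ===== LEMMAS AND PROOFS =====

-- number of zeros in a list, as an Int
def zc (l : List Int) : Int := ((l.countP (fun x => x == 0) : Nat) : Int)

theorem zc_nil : zc [] = 0 := rfl

theorem zc_cons (x : Int) (l : List Int) :
    zc (x :: l) = (if x == 0 then (1:Int) else 0) + zc l := by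
  unfold zc
  rw [List.countP_cons]
  by_cases h : x = 0
  · simp [h]; omega
  · simp [h]

theorem zc_append (l1 l2 : List Int) : zc (l1 ++ l2) = zc l1 + zc l2 := by
  unfold zc
  rw [List.countP_append]
  push_cast
  ring

-- the common reference value: the prefix-zero-count table
def refT (seq : List Int) : List Int :=
  (List.range (seq.length + 1)).map (fun j => zc (seq.take j))

theorem refT_nil : refT [] = [0] := rfl

theorem refT_singleton (x : Int) :
    refT [x] = [0, if x == 0 then 1 else 0] := by
  simp [refT, List.range_succ, zc_cons, zc_nil]

theorem refT_last (l : List Int) :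
    PySem.List.pyGetD (refT l) (-1) 0 = zc l := by
  unfold refT
  rw [List.range_succ, List.map_append]
  simp only [List.map_cons, List.map_nil]
  rw [PySem.List.pyGetD_neg_one_append_singleton]
  simp

theorem refT_append (l1 l2 : List Int) :
    refT (l1 ++ l2) = refT l1 ++ ((refT l2).drop 1).map (fun c => zc l1 + c) := by
  unfold refT
  have hlen : (l1 ++ l2).length + 1 = (l1.length + 1) + l2.length := by
    simp; omega
  rw [hlen, List.range_add, List.map_append, List.map_map]
  congr 1
  · apply List.map_congr_left
    intro j hj
    rw [List.mem_range] at hj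
    rw [List.take_append_of_le_length (by omega)]
  · rw [List.range_succ_eq_map]
    simp only [List.map_cons, List.drop_one, List.tail_cons, List.map_map]
    apply List.map_congr_left
    intro i _
    simp only [Function.comp, Nat.succ_eq_add_one]
    have h1 : l1.length + 1 + i = l1.length + (i + 1) := by omega
    have htk : (l1 ++ l2).take (l1.length + (i + 1)) = l1 ++ l2.take (i + 1) := by
      rw [List.take_append, List.take_of_length_le (by omega)]
      have h2 : l1.length + (i + 1) - l1.length = i + 1 := by omega
      rw [h2]
    rw [h1, htk, zc_append]

theorem tableB_eq (seq : List Int) : ∀ (n lo hi : Nat), hi - lo ≤ n → lo ≤ hi →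
    hi ≤ seq.length →
    pvTableB seq n lo hi = refT ((seq.drop lo).take (hi - lo)) := by
  intro n
  induction n with
  | zero =>
    intro lo hi h1 _ _
    have : hi - lo = 0 := by omega
    rw [this]
    simp [pvTableB, refT_nil]
  | succ n ih =>
    intro lo hi h1 h2 h3
    rw [pvTableB]
    by_cases h0 : hi - lo = 0
    · rw [if_pos h0, h0]; simp [refT_nil]
    rw [if_neg h0]
    by_cases hone : hi - lo = 1
    · rw [if_pos hone, hone]
      have hlo : lo < seq.length := by omega
      have hget : PySem.List.pyGetD seq (lo : Int) 0 = seq[lo] := by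
        rw [PySem.List.pyGetD_natCast, List.getD_eq_getElem?_getD,
          List.getElem?_eq_getElem hlo]
        rfl
      have htake : (seq.drop lo).take 1 = [seq[lo]] := by
        rw [List.take_one, List.head?_drop, List.getElem?_eq_getElem hlo]
        rfl
      rw [hget, htake, refT_singleton]
    · rw [if_neg hone]
      have hmid1 : lo ≤ (lo + hi) / 2 := by omega
      have hmid2 : (lo + hi) / 2 ≤ hi := by omega
      have hL := ih lo ((lo + hi) / 2) (by omega) hmid1 (by omega)
      have hR := ih ((lo + hi) / 2) hi (by omega) hmid2 h3
      simp only [hL, hR]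
      have hsplit : (seq.drop lo).take (hi - lo)
          = (seq.drop lo).take ((lo + hi) / 2 - lo)
            ++ (seq.drop ((lo + hi) / 2)).take (hi - (lo + hi) / 2) := by
        have h4 : hi - lo = ((lo + hi) / 2 - lo) + (hi - (lo + hi) / 2) := by omega
        rw [h4, List.take_add]
        congr 2
        rw [List.drop_drop]
        congr 1
        omega
      rw [hsplit, refT_append, refT_last, PySem.List.slice_from_one,
        ← List.drop_one]

theorem B_eq_ref (seq : List Int) : prefzeroes1_alt seq = refT seq := by
  unfold prefzeroes1_alt
  rw [tableB_eq seq seq.length 0 seq.length (by omega) (by omega) (le_refl _)]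
  simp

theorem A_loop (seq : List Int) : ∀ (k : Nat), k ≤ seq.length →
    ((List.range k).map (fun j : Nat => (j : Int))).foldl (fun ps i =>
      if PySem.List.pyGetD seq i 0 == 0 then
        PySem.List.pySetD ps (i + 1) (PySem.List.pyGetD ps i 0 + 1)
      else
        PySem.List.pySetD ps (i + 1) (PySem.List.pyGetD ps i 0))
      (List.replicate (seq.length + 1) 0)
      = (List.range (k + 1)).map (fun j => zc (seq.take j))
          ++ List.replicate (seq.length - k) 0 := by
  intro k
  induction k with
  | zero =>
    intro _
    simp [List.range_succ, zc_nil, List.replicate_succ]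
  | succ k ih =>
    intro hk
    have hk' : k < seq.length := by omega
    rw [List.range_succ, List.map_append, List.foldl_append, ih (by omega)]
    simp only [List.map_cons, List.map_nil, List.foldl_cons, List.foldl_nil]
    set pref : List Int := (List.range (k + 1)).map (fun j => zc (seq.take j)) with hpref
    have hlen : pref.length = k + 1 := by simp [hpref]
    have hrep : seq.length - k = (seq.length - (k + 1)) + 1 := by omega
    have hseqk : PySem.List.pyGetD seq (k : Int) 0 = seq[k] := by
      rw [PySem.List.pyGetD_natCast, List.getD_eq_getElem?_getD, List.getElem?_eq_getElem hk']
      rfl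
    have hpsk : PySem.List.pyGetD (pref ++ List.replicate (seq.length - k) 0) (k : Int) 0
        = zc (seq.take k) := by
      rw [PySem.List.pyGetD_natCast, List.getD_eq_getElem?_getD,
        List.getElem?_append_left (by omega)]
      simp [hpref]
    have hset : ∀ v : Int,
        PySem.List.pySetD (pref ++ List.replicate (seq.length - k) 0) ((k : Int) + 1) v
          = pref ++ v :: List.replicate (seq.length - (k + 1)) 0 := by
      intro v
      have : ((k : Int) + 1) = ((k + 1 : Nat) : Int) := by push_cast; ring
      rw [this, PySem.List.pySetD_natCast, List.set_append]
      rw [if_neg (by omega)]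
      simp [hlen, hrep, List.replicate_succ]
    have htake : zc (seq.take (k + 1)) = zc (seq.take k) + (if seq[k] == 0 then (1:Int) else 0) := by
      rw [List.take_add_one, List.getElem?_eq_getElem hk']
      simp only [Option.toList_some, zc_append, zc_cons, zc_nil]
      split_ifs <;> simp_all
    have hout : (List.range (k + 1 + 1)).map (fun j => zc (seq.take j))
        = pref ++ [zc (seq.take (k + 1))] := by
      rw [List.range_succ, List.map_append]; rfl
    rw [hseqk, hpsk]
    split_ifs with h
    · rw [hset, hout, htake, if_pos h]
      simp
    · rw [hset, hout, htake, if_neg h]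
      simp

theorem A_eq_ref (seq : List Int) : prefzeroes1 seq = refT seq := by
  unfold prefzeroes1 refT
  simp only [PySem.List.pyRange_zero_natCast]
  rw [A_loop seq seq.length (le_refl _)]
  simp

-- ===== VERDICT (by name: the statement is the Claim_ definition above) =====
theorem prefzeroes1_spec : Claim_equal_prefzeroes1 := by
  intro seq _
  unfold Spec_prefzeroes1
  rw [A_eq_ref, B_eq_ref]
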